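-- pv_equiv track=rewrite | github.com/Sammellett365/Cash-out-King | betting_simulator (1).py | calculate_number_of_bets
-- ===== SOURCE A (Python) =====
-- import math
--
-- def calculate_number_of_bets(bet_type, n):
--     if bet_type == "Single":
--         return n
--     elif bet_type == "Double":
--         return math.comb(n, 2)
--     elif bet_type == "Treble":
--         return math.comb(n, 3)
--     elif bet_type == "Fourfold":
--         return math.comb(n, 4)
--     elif bet_type == "Trixie" and n >= 3:
--         return math.comb(n, 2) + math.comb(n, 3)
--     elif bet_type == "Yankee" and n >= 4:
--         return math.comb(n, 2) + math.comb(n, 3) + math.comb(n, 4)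
--     elif bet_type == "Lucky 15" and n >= 4:
--         return math.comb(n, 1) + math.comb(n, 2) + math.comb(n, 3) + math.comb(n, 4)
--     elif bet_type == "Super Heinz" and n == 7:
--         return sum(math.comb(n, r) for r in range(2, 8))
--     else:
--         return 0
-- ===== SOURCE B (Python) =====
-- def calculate_number_of_bets(bet_type, n):
--     if bet_type == "Single":
--         return n
--     # Each multiple type sums C(n, r) over one contiguous band of r-values,
--     # subject to lower/upper bounds on n.
--     specs = {
--         "Double": (2, 2, None, None),
--         "Treble": (3, 3, None, None),
--         "Fourfold": (4, 4, None, None),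
--         "Trixie": (2, 3, 3, None),
--         "Yankee": (2, 4, 4, None),
--         "Lucky 15": (1, 4, 4, None),
--         "Super Heinz": (2, 7, 7, 7),
--     }
--     if bet_type not in specs:
--         return 0
--     lo, hi, nmin, nmax = specs[bet_type]
--     if nmin is not None and n < nmin:
--         return 0
--     if nmax is not None and n > nmax:
--         return 0
--     # One multiplicative pass builds C(n, r) from C(n, r-1); no comb calls.
--     total, c = 0, 1
--     for r in range(1, hi + 1):
--         c = c * (n - r + 1) // r
--         if r >= lo:
--             total += c
--     return total
-- ===== Notes on version B (the rewrite author's own statement) =====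
-- stated objective: alternative
-- what changed: Replaces per-branch math.comb calls by one generic loop that builds C(n,r) incrementally via the multiplicative recurrence c = c*(n-r+1)//r over a contiguous r-band (lo..hi) looked up per bet type, with n-bound checks; 'Single' stays a special case.
-- outside the precondition, e.g. on calculate_number_of_bets('Double', -2): A raises ValueError, B returns 3
import Mathlib
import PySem

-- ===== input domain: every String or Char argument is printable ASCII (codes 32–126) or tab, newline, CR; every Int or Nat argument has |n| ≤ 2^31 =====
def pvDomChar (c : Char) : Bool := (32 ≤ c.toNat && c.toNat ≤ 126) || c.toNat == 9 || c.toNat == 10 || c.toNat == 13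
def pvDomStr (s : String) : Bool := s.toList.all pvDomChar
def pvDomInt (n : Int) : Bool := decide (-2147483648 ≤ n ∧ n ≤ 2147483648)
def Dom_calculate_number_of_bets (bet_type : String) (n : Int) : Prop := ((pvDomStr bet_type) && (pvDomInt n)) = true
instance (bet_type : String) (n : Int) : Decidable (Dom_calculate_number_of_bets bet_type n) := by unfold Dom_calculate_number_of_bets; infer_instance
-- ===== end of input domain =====

-- B replaces A's per-branch math.comb calls by one generic multiplicative-recurrence loop
-- (c = c*(n-r+1)//r) over a contiguous r-band looked up per bet type; objective: alternative.
-- Pre_ excludes the inputs where A raises ValueError (math.comb with negative n).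


-- math.comb(n, k) for n ≥ 0 (exact there; A only reaches it under guards or Pre_)
def pyComb (n : Int) (k : Nat) : Int := (n.toNat.choose k : Int)

-- ===== PORT A =====
def calculate_number_of_bets (bet_type : String) (n : Int) : Int :=
  if bet_type = "Single" then n
  else if bet_type = "Double" then pyComb n 2
  else if bet_type = "Treble" then pyComb n 3
  else if bet_type = "Fourfold" then pyComb n 4
  else if bet_type = "Trixie" ∧ 3 ≤ n then pyComb n 2 + pyComb n 3
  else if bet_type = "Yankee" ∧ 4 ≤ n then pyComb n 2 + pyComb n 3 + pyComb n 4
  else if bet_type = "Lucky 15" ∧ 4 ≤ n then pyComb n 1 + pyComb n 2 + pyComb n 3 + pyComb n 4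
  else if bet_type = "Super Heinz" ∧ n = 7 then
    (PySem.List.pyRange 2 8 1).foldl (fun acc r => acc + pyComb n r.toNat) 0
  else 0

-- ===== PORT B =====
-- bet_type -> (lo, hi, nmin, nmax): sum C(n,r) for r in lo..hi, subject to nmin ≤ n ≤ nmax
def pvSpecs : PySem.Dict String (Nat × Nat × Option Int × Option Int) :=
  PySem.Dict.ofList
    [ ("Double", (2, 2, none, none)),
      ("Treble", (3, 3, none, none)),
      ("Fourfold", (4, 4, none, none)),
      ("Trixie", (2, 3, some 3, none)),
      ("Yankee", (2, 4, some 4, none)),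
      ("Lucky 15", (1, 4, some 4, none)),
      ("Super Heinz", (2, 7, some 7, some 7)) ]

-- the multiplicative-recurrence loop of Source B (r runs 1..hi; state = (total, c))
def pvLoop (n : Int) (lo : Nat) : Nat → Int × Int
  | 0 => (0, 1)
  | r + 1 =>
    ((if lo ≤ r + 1 then
        (pvLoop n lo r).1 +
          PySem.Int.floordiv ((pvLoop n lo r).2 * (n - ((r : Int) + 1) + 1)) ((r : Int) + 1)
      else (pvLoop n lo r).1),
     PySem.Int.floordiv ((pvLoop n lo r).2 * (n - ((r : Int) + 1) + 1)) ((r : Int) + 1))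

def pvRunSum (n : Int) (lo hi : Nat) : Int := (pvLoop n lo hi).1

def calculate_number_of_bets_alt (bet_type : String) (n : Int) : Int :=
  if bet_type = "Single" then n
  else
    match pvSpecs.get? bet_type with
    | none => 0
    | some (lo, hi, nmin, nmax) =>
      if (match nmin with | some m => decide (n < m) | none => false) then 0
      else if (match nmax with | some m => decide (m < n) | none => false) then 0
      else pvRunSum n lo hi

-- ===== PRECONDITION & SPEC =====
-- Pre_ excludes exactly the inputs where A raises ValueError: math.comb with negative n
-- on the unguarded "Double"/"Treble"/"Fourfold" branches.
def Pre_calculate_number_of_bets (bet_type : String) (n : Int) : Prop :=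
  ¬ ((bet_type = "Double" ∨ bet_type = "Treble" ∨ bet_type = "Fourfold") ∧ n < 0)
instance (bet_type : String) (n : Int) : Decidable (Pre_calculate_number_of_bets bet_type n) := by unfold Pre_calculate_number_of_bets; infer_instance
def pvWitness_calculate_number_of_bets : String × Int := ("Yankee", 5)

def Spec_calculate_number_of_bets (bet_type : String) (n : Int) (out : Int) : Prop := out = calculate_number_of_bets_alt bet_type n
instance (bet_type : String) (n : Int) (out : Int) : Decidable (Spec_calculate_number_of_bets bet_type n out) := by unfold Spec_calculate_number_of_bets; infer_instance

-- ===== CLAIM (what is proved, stated in full; the proofs are below) =====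
def Claim_equal_calculate_number_of_bets : Prop := ∀ (bet_type : String) (n : Int), Dom_calculate_number_of_bets bet_type n → Pre_calculate_number_of_bets bet_type n → Spec_calculate_number_of_bets bet_type n (calculate_number_of_bets bet_type n)

-- ===== LEMMAS AND PROOFS =====

-- the multiplicative step: C(n,k) * (n-k) // (k+1) = C(n,k+1) for 0 ≤ n
lemma pvStep (n : Int) (hn : 0 ≤ n) (k : Nat) :
    PySem.Int.floordiv (pyComb n k * (n - (k : Int))) ((k : Int) + 1) = pyComb n (k + 1) := by
  obtain ⟨m, rfl⟩ : ∃ m : Nat, n = (m : Int) := ⟨n.toNat, (Int.toNat_of_nonneg hn).symm⟩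
  by_cases hk : k < m
  · have hsub : (m : Int) - (k : Int) = ((m - k : Nat) : Int) := by
      push_cast [Nat.cast_sub hk.le]; ring
    simp only [pyComb, Int.toNat_natCast]
    rw [hsub,
      show ((m.choose k : Nat) : Int) * ((m - k : Nat) : Int) = ((m.choose k * (m - k) : Nat) : Int)
        by push_cast; ring,
      show ((k : Int) + 1) = ((k + 1 : Nat) : Int) by push_cast; ring,
      PySem.Int.floordiv_natCast,
      ← Nat.choose_succ_right_eq, Nat.mul_div_cancel _ (Nat.succ_pos k)]
  · have h0 : pyComb (m : Int) k * ((m : Int) - (k : Int)) = 0 := by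
      rcases Nat.lt_or_ge m k with h | h
      · simp [pyComb, Nat.choose_eq_zero_of_lt h]
      · have hm : m = k := le_antisymm (not_lt.mp hk) h
        subst hm; simp
    rw [h0, PySem.Int.floordiv_eq_ediv_of_pos (by positivity), Int.zero_ediv]
    have hlt : m < k + 1 := by omega
    simp [pyComb, Nat.choose_eq_zero_of_lt hlt]

-- loop invariant for c: after r iterations, c = C(n, r)
lemma pvLoop_snd (n : Int) (hn : 0 ≤ n) (lo : Nat) : ∀ r : Nat, (pvLoop n lo r).2 = pyComb n r := by
  intro r
  induction r with
  | zero => simp [pvLoop, pyComb]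
  | succ r ih =>
    show PySem.Int.floordiv ((pvLoop n lo r).2 * (n - ((r : Int) + 1) + 1)) ((r : Int) + 1) = _
    rw [ih, show n - ((r : Int) + 1) + 1 = n - (r : Int) by ring]
    exact pvStep n hn r

lemma pvLoop_fst_zero (n : Int) (lo : Nat) : (pvLoop n lo 0).1 = 0 := rfl

lemma pvLoop_fst_succ (n : Int) (lo r : Nat) :
    (pvLoop n lo (r + 1)).1 =
      if lo ≤ r + 1 then (pvLoop n lo r).1 + (pvLoop n lo (r + 1)).2 else (pvLoop n lo r).1 := rfl

lemma pvSpecs_get_ne (bt : String) (h2 : ¬ bt = "Double") (h3 : ¬ bt = "Treble")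
    (h4 : ¬ bt = "Fourfold") (h5 : ¬ bt = "Trixie") (h6 : ¬ bt = "Yankee")
    (h7 : ¬ bt = "Lucky 15") (h8 : ¬ bt = "Super Heinz") : pvSpecs.get? bt = none := by
  show (PySem.Dict.mk
    [ ("Double", ((2:Nat), (2:Nat), (none : Option Int), (none : Option Int))),
      ("Treble", (3, 3, none, none)),
      ("Fourfold", (4, 4, none, none)),
      ("Trixie", (2, 3, some 3, none)),
      ("Yankee", (2, 4, some 4, none)),
      ("Lucky 15", (1, 4, some 4, none)),
      ("Super Heinz", (2, 7, some 7, some 7)) ]).get? bt = none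
  simp [PySem.Dict.get?, Ne.symm h2, Ne.symm h3, Ne.symm h4,
    Ne.symm h5, Ne.symm h6, Ne.symm h7, Ne.symm h8]

-- ===== VERDICT (by name: the statement is the Claim_ definition above) =====
theorem calculate_number_of_bets_spec : Claim_equal_calculate_number_of_bets := by
  intro bt n _ hpre
  unfold Spec_calculate_number_of_bets
  by_cases h1 : bt = "Single"
  · simp [calculate_number_of_bets, calculate_number_of_bets_alt, h1]
  by_cases h2 : bt = "Double"
  · subst h2
    have hn : 0 ≤ n := by by_contra h; exact hpre ⟨Or.inl rfl, by omega⟩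
    simp [calculate_number_of_bets, calculate_number_of_bets_alt]
    rw [show pvSpecs.get? "Double" = some (2, 2, none, none) from by decide]
    simp [pvRunSum, pvLoop_fst_succ, pvLoop_fst_zero, pvLoop_snd n hn]
  by_cases h3 : bt = "Treble"
  · subst h3
    have hn : 0 ≤ n := by by_contra h; exact hpre ⟨Or.inr (Or.inl rfl), by omega⟩
    simp [calculate_number_of_bets, calculate_number_of_bets_alt]
    rw [show pvSpecs.get? "Treble" = some (3, 3, none, none) from by decide]
    simp [pvRunSum, pvLoop_fst_succ, pvLoop_fst_zero, pvLoop_snd n hn]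
  by_cases h4 : bt = "Fourfold"
  · subst h4
    have hn : 0 ≤ n := by by_contra h; exact hpre ⟨Or.inr (Or.inr rfl), by omega⟩
    simp [calculate_number_of_bets, calculate_number_of_bets_alt]
    rw [show pvSpecs.get? "Fourfold" = some (4, 4, none, none) from by decide]
    simp [pvRunSum, pvLoop_fst_succ, pvLoop_fst_zero, pvLoop_snd n hn]
  by_cases h5 : bt = "Trixie"
  · subst h5
    simp [calculate_number_of_bets, calculate_number_of_bets_alt]
    rw [show pvSpecs.get? "Trixie" = some (2, 3, some 3, none) from by decide]
    by_cases hg : 3 ≤ n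
    · simp [hg, show ¬ n < 3 by omega,
        pvRunSum, pvLoop_fst_succ, pvLoop_fst_zero, pvLoop_snd n (by omega)]
    · simp [hg, show n < 3 by omega]
  by_cases h6 : bt = "Yankee"
  · subst h6
    simp [calculate_number_of_bets, calculate_number_of_bets_alt]
    rw [show pvSpecs.get? "Yankee" = some (2, 4, some 4, none) from by decide]
    by_cases hg : 4 ≤ n
    · simp [hg, show ¬ n < 4 by omega,
        pvRunSum, pvLoop_fst_succ, pvLoop_fst_zero, pvLoop_snd n (by omega)]
    · simp [hg, show n < 4 by omega]
  by_cases h7 : bt = "Lucky 15"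
  · subst h7
    simp [calculate_number_of_bets, calculate_number_of_bets_alt]
    rw [show pvSpecs.get? "Lucky 15" = some (1, 4, some 4, none) from by decide]
    by_cases hg : 4 ≤ n
    · simp [hg, show ¬ n < 4 by omega,
        pvRunSum, pvLoop_fst_succ, pvLoop_fst_zero, pvLoop_snd n (by omega)]
    · simp [hg, show n < 4 by omega]
  by_cases h8 : bt = "Super Heinz"
  · subst h8
    by_cases hg : n = 7
    · subst hg; decide
    · simp [calculate_number_of_bets, calculate_number_of_bets_alt, hg]
      rw [show pvSpecs.get? "Super Heinz" = some (2, 7, some 7, some 7) from by decide]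
      simp; omega
  · simp [calculate_number_of_bets, calculate_number_of_bets_alt, h1, h2, h3, h4, h5, h6, h7, h8,
      pvSpecs_get_ne bt h2 h3 h4 h5 h6 h7 h8]
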